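-- pv_equiv track=rewrite | github.com/European-XFEL/karabo_data | karabo_data/read_machinery.py | union_selections
-- ===== SOURCE A (Python) =====
-- from collections import defaultdict
--
-- def union_selections(selections):
--     """Merge together different selections
--
--     A selection is a dict of {source: set(keys)}, or {source: None}
--     to include all keys for a given source.
--     """
--     selection_multi = defaultdict(list)
--
--     for seln in selections:
--         for source, keys in seln.items():
--             selection_multi[source].append(keys)
--
--     # Merge selected keys; None -> all keys selected
--     return {
--         source: None if (None in keygroups) else set().union(*keygroups)
--         for (source, keygroups) in selection_multi.items()
--     }
-- ===== SOURCE B (Python) =====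
-- def union_selections(selections):
--     """Merge together different selections
--
--     A selection is a dict of {source: set(keys)}, or {source: None}
--     to include all keys for a given source.
--
--     Single pass: merge directly into the result dict (None is sticky).
--     """
--     result = {}
--     for seln in selections:
--         for source, keys in seln.items():
--             cur = result.get(source, set())
--             if keys is None or cur is None:
--                 result[source] = None
--             else:
--                 result[source] = cur | keys
--     return result
-- ===== Notes on version B (the rewrite author's own statement) =====
-- stated objective: simpler
-- what changed: Replaces the two-phase defaultdict-of-keygroups collection followed by a reduction comprehension with a single pass that merges each (source, keys) directly into the result dict, keeping None sticky.
import Mathlib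
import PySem

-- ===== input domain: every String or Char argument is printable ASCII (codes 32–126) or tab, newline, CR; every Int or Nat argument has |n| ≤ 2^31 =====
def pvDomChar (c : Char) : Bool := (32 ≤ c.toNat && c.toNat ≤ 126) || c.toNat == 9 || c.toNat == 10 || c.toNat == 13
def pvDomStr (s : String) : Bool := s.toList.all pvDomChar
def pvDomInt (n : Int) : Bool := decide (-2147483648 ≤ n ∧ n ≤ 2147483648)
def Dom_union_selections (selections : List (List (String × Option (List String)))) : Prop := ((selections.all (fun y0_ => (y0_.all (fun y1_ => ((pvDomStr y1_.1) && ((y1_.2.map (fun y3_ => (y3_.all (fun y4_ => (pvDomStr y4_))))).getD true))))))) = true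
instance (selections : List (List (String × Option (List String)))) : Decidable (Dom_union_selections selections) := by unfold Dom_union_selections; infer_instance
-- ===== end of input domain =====

-- B merges every (source, keys) pair in one pass directly into the result dict (None sticky),
-- instead of A's two phases (collect keygroup lists per source, then reduce them); return values proved equal.

-- ===== PORT A =====
-- 'None if (None in keygroups) else set().union(*keygroups)'; in the else branch no element is
-- none, so 'ks.getD []' merely unwraps the Option (exact there).
def mergeKeygroups (kg : List (Option (List String))) : Option (List String) :=
  if none ∈ kg then none
  else some (kg.foldl (fun acc ks => PySem.Set.union acc (ks.getD [])) PySem.Set.empty)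

def union_selections (selections : List (List (String × Option (List String)))) : List (String × Option (List String)) :=
  -- selection_multi[source].append(keys), over both loops; then the dict comprehension
  ((selections.foldl (fun m seln =>
      seln.foldl (fun m p => PySem.Dict.modify m p.1 [] (· ++ [p.2])) m)
    (PySem.Dict.empty)).items).map (fun p => (p.1, mergeKeygroups p.2))

-- ===== PORT B =====
-- body of B's inner loop: cur = result.get(source, set()); None sticky, else union into a fresh set
def mergeStep (r : PySem.Dict String (Option (List String))) (p : String × Option (List String)) : PySem.Dict String (Option (List String)) :=
  match p.2, PySem.Dict.getD r p.1 (some PySem.Set.empty) with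
  | none, _ => PySem.Dict.insert r p.1 none
  | _, none => PySem.Dict.insert r p.1 none
  | some ks, some st => PySem.Dict.insert r p.1 (some (PySem.Set.union st ks))

def union_selections_alt (selections : List (List (String × Option (List String)))) : List (String × Option (List String)) :=
  (selections.foldl (fun r seln => seln.foldl mergeStep r) PySem.Dict.empty).items

-- ===== PRECONDITION & SPEC =====
def Spec_union_selections (selections : List (List (String × Option (List String)))) (out : List (String × Option (List String))) : Prop := out = union_selections_alt selections
instance (selections : List (List (String × Option (List String)))) (out : List (String × Option (List String))) : Decidable (Spec_union_selections selections out) := by unfold Spec_union_selections; infer_instance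

-- ===== CLAIM (what is proved, stated in full; the proofs are below) =====
def Claim_equal_union_selections : Prop := ∀ (selections : List (List (String × Option (List String)))), Dom_union_selections selections → Spec_union_selections selections (union_selections selections)

-- ===== LEMMAS AND PROOFS =====

-- A's final comprehension, applied to the intermediate dict while it is being built
def pvMapV (m : PySem.Dict String (List (Option (List String)))) : PySem.Dict String (Option (List String)) :=
  PySem.Dict.mk (m.items.map (fun p => (p.1, mergeKeygroups p.2)))

lemma pvMapV_get? (m : PySem.Dict String (List (Option (List String)))) (k : String) :
    PySem.Dict.get? (pvMapV m) k = (PySem.Dict.get? m k).map mergeKeygroups := by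
  simp only [pvMapV, PySem.Dict.get?]
  rw [List.find?_map]
  simp only [Function.comp_def]
  cases List.find? (fun p => p.1 == k) m.items <;> simp

lemma pvMapV_getD (m : PySem.Dict String (List (Option (List String)))) (k : String) :
    PySem.Dict.getD (pvMapV m) k (some PySem.Set.empty) = mergeKeygroups (PySem.Dict.getD m k []) := by
  rw [PySem.Dict.getD_eq_get?_getD, PySem.Dict.getD_eq_get?_getD, pvMapV_get?]
  cases PySem.Dict.get? m k with
  | none => simp [mergeKeygroups, PySem.Set.empty]
  | some kg => simp

lemma pvMapV_contains (m : PySem.Dict String (List (Option (List String)))) (k : String) :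
    PySem.Dict.contains (pvMapV m) k = PySem.Dict.contains m k := by
  simp [pvMapV, PySem.Dict.contains_eq_isSome_get?, PySem.Dict.get?, List.find?_map]
  rfl

lemma pvMapV_insert (m : PySem.Dict String (List (Option (List String)))) (k : String) (w : List (Option (List String))) :
    pvMapV (PySem.Dict.insert m k w) = PySem.Dict.insert (pvMapV m) k (mergeKeygroups w) := by
  simp only [PySem.Dict.insert, pvMapV_contains]
  by_cases h : PySem.Dict.contains m k
  · simp only [h, if_true, pvMapV, List.map_map]
    congr 1
    apply List.map_congr_left
    intro p _
    by_cases hp : p.1 = k <;> simp [hp]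
  · simp [h, pvMapV]

lemma pvStep (m : PySem.Dict String (List (Option (List String)))) (p : String × Option (List String)) :
    pvMapV (PySem.Dict.modify m p.1 [] (· ++ [p.2])) = mergeStep (pvMapV m) p := by
  obtain ⟨k, v⟩ := p
  show pvMapV (PySem.Dict.insert m k (PySem.Dict.getD m k [] ++ [v])) = _
  rw [pvMapV_insert]
  unfold mergeStep
  rw [pvMapV_getD]
  cases v with
  | none => simp [mergeKeygroups]
  | some ks =>
    by_cases h : none ∈ PySem.Dict.getD m k []
    · simp [mergeKeygroups, h]
    · simp [mergeKeygroups, h, List.foldl_append]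

lemma pvFold1 (l : List (String × Option (List String))) (m : PySem.Dict String (List (Option (List String)))) :
    pvMapV (l.foldl (fun m p => PySem.Dict.modify m p.1 [] (· ++ [p.2])) m) = l.foldl mergeStep (pvMapV m) := by
  induction l generalizing m with
  | nil => rfl
  | cons p t ih => simp only [List.foldl_cons]; rw [ih, pvStep]

lemma pvFold2 (ss : List (List (String × Option (List String)))) (m : PySem.Dict String (List (Option (List String)))) :
    pvMapV (ss.foldl (fun m seln => seln.foldl (fun m p => PySem.Dict.modify m p.1 [] (· ++ [p.2])) m) m)
      = ss.foldl (fun r seln => seln.foldl mergeStep r) (pvMapV m) := by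
  induction ss generalizing m with
  | nil => rfl
  | cons s t ih => simp only [List.foldl_cons]; rw [ih, pvFold1]

-- ===== VERDICT (by name: the statement is the Claim_ definition above) =====
theorem union_selections_spec : Claim_equal_union_selections := by
  intro selections _
  show union_selections selections = union_selections_alt selections
  exact congrArg PySem.Dict.items (pvFold2 selections PySem.Dict.empty)
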